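-- pv_equiv track=rewrite | github.com/tezeladata/algorithmical | Second account/Codewars/6kyu.py | more_zeros
-- ===== SOURCE A (Python) =====
-- def more_zeros(s):
--     binary, filtered = [bin(ord(i))[2:] for i in s], []
--     for i in binary:
--         if i.count("0") > i.count("1"): filtered.append(i)
--     res = [chr(int(i, 2)) for i in filtered]
--     fin = []
--     for i in res:
--         if i not in fin: fin.append(i)
--     return fin
-- ===== SOURCE B (Python) =====
-- def more_zeros(s):
--     # dedupe FIRST (dict.fromkeys keeps first occurrences in order), then test each
--     # distinct char once with an explicit bit-shift counter: keep when bits > 2*ones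
--     # (i.e. zeros > ones); ord(c) == 0 kept since bin(0)[2:] == '0' is a lone zero.
--     out = []
--     for c in dict.fromkeys(s):
--         n = ord(c)
--         bits = ones = 0
--         while n:
--             bits += 1
--             ones += n & 1
--             n >>= 1
--         if bits > 2 * ones or ord(c) == 0:
--             out.append(c)
--     return out
-- ===== Notes on version B (the rewrite author's own statement) =====
-- stated objective: faster
-- what changed: B swaps the pass order and the predicate's representation: it dedupes the whole string first via dict.fromkeys (no quadratic list-membership scan, no binary-string round trip chr(int(bin(...),2))), then tests each distinct character once with a bit-shift loop counting bits and ones (keep when bits > 2*ones); correct because filtering commutes with stable first-occurrence dedup.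
import Mathlib
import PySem

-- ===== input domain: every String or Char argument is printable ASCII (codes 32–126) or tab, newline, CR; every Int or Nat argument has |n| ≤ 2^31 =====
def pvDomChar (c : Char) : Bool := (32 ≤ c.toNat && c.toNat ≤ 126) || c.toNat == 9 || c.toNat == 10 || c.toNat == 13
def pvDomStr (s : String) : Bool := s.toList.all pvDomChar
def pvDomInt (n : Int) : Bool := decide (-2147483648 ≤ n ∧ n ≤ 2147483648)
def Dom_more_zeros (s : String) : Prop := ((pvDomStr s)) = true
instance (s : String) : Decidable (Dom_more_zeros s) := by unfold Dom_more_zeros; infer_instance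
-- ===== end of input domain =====

-- B dedupes first (dict.fromkeys) and then tests each distinct character once with a
-- bit-shift counter, instead of A's binary-string build, count-filter, chr(int(.,2))
-- round trip and quadratic list-membership dedupe; objective: simpler.

-- ===== PORT A =====
-- int(i, 2), hand-ported: exact on strings of '0'/'1' digits, which is all A ever feeds it
def parseBin (i : List Char) : Nat := i.foldl (fun a c => 2 * a + (if c = '1' then 1 else 0)) 0

def more_zeros (s : String) : List String :=
  -- bin(ord(i))[2:] = PySem.Int.toBinChars (format(n,'b')) since ord(i) ≥ 0
  let binary := s.toList.map (fun i => PySem.Int.toBinChars (i.toNat : Int))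
  let filtered := binary.foldl (fun acc i => if i.count '0' > i.count '1' then acc ++ [i] else acc) []
  let res := filtered.map (fun i => String.ofList [Char.ofNat (parseBin i)])
  res.foldl (fun fin i => if i ∈ fin then fin else fin ++ [i]) []

-- ===== PORT B =====
-- B's while loop 'while n: bits += 1; ones += n & 1; n >>= 1', fuel = starting n (a
-- totality guard only: n/2 < n, so fuel n always suffices)
def bitsOnesAux : Nat → Nat → Nat × Nat
  | _, 0 => (0, 0)
  | 0, _ + 1 => (0, 0)   -- never reached: fuel ≥ n at every call
  | fuel + 1, n + 1 =>
      let p := bitsOnesAux fuel ((n + 1) / 2)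
      (p.1 + 1, p.2 + (n + 1) % 2)

def bitsOnes (n : Nat) : Nat × Nat := bitsOnesAux n n

def keepB (c : Char) : Bool :=
  let r := bitsOnes c.toNat
  decide (2 * r.2 < r.1) || decide (c.toNat = 0)

def more_zeros_alt (s : String) : List String :=
  -- dict.fromkeys(s) = PySem.List.dedup (first occurrences, in order)
  (PySem.List.dedup s.toList).foldl
    (fun out c => if keepB c then out ++ [String.ofList [c]] else out) []

-- ===== PRECONDITION & SPEC =====
def Spec_more_zeros (s : String) (out : List String) : Prop := out = more_zeros_alt s
instance (s : String) (out : List String) : Decidable (Spec_more_zeros s out) := by unfold Spec_more_zeros; infer_instance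

-- ===== CLAIM (what is proved, stated in full; the proofs are below) =====
def Claim_equal_more_zeros : Prop := ∀ (s : String), Dom_more_zeros s → Spec_more_zeros s (more_zeros s)

-- ===== LEMMAS AND PROOFS =====

def mkStr (c : Char) : String := String.ofList [c]

-- per-code facts over all codes the domain admits: A's count test equals B's bit test,
-- and chr(int(bin(n)[2:],2)) is the identity
theorem perCode : ∀ n : Nat, n ≤ 126 →
    (decide ((PySem.Int.toBinChars (n : Int)).count '0' > (PySem.Int.toBinChars (n : Int)).count '1')
      = (decide (2 * (bitsOnes n).2 < (bitsOnes n).1) || decide (n = 0)))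
    ∧ parseBin (PySem.Int.toBinChars (n : Int)) = n := by decide

theorem dom_code_le (c : Char) (h : pvDomChar c = true) : c.toNat ≤ 126 := by
  simp [pvDomChar] at h; omega

theorem mkStr_inj : Function.Injective mkStr := by
  intro a b h
  have := congrArg String.toList h
  rw [mkStr, mkStr, String.toList_ofList, String.toList_ofList] at this
  simpa using this

-- A's dedupe loop is folding PySem.Set.add
theorem dedup_fold_eq_add (l : List String) (acc : List String) :
    l.foldl (fun fin i => if i ∈ fin then fin else fin ++ [i]) acc = l.foldl PySem.Set.add acc := by
  induction l generalizing acc with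
  | nil => rfl
  | cons x l ih =>
      simp only [List.foldl_cons, PySem.Set.add]
      by_cases hx : x ∈ acc
      · simp [hx, ih]
      · simp [hx, ih]

-- folding Set.add commutes with mapping an injective function
theorem foldl_add_map (f : Char → String) (hf : Function.Injective f) (l : List Char) (s : List Char) :
    (l.map f).foldl PySem.Set.add (s.map f) = (l.foldl PySem.Set.add s).map f := by
  induction l generalizing s with
  | nil => rfl
  | cons c l ih =>
      simp only [List.map_cons, List.foldl_cons, PySem.Set.add]
      have hmem : (f c ∈ s.map f) ↔ (c ∈ s) := by
        constructor
        · intro h; rcases List.mem_map.1 h with ⟨d, hd, he⟩; rwa [hf he] at hd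
        · intro h; exact List.mem_map_of_mem h
      by_cases hc : c ∈ s
      · simp [hmem, hc, ih]
      · rw [if_neg (by simp [hmem, hc]), if_neg (by simp [hc])]
        rw [show List.map f s ++ [f c] = List.map f (s ++ [c]) by simp]
        exact ih (s ++ [c])

-- filtering commutes with stable first-occurrence dedup (the fold of Set.add)
theorem filter_foldl_add (p : Char → Bool) (l : List Char) (acc : List Char) :
    (l.foldl PySem.Set.add acc).filter p = (l.filter p).foldl PySem.Set.add (acc.filter p) := by
  induction l generalizing acc with
  | nil => rfl
  | cons c l ih =>
      by_cases hc : c ∈ acc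
      · have hadd : PySem.Set.add acc c = acc := by
          simp [PySem.Set.add, PySem.Set.contains, hc]
        by_cases hp : p c = true
        · have : PySem.Set.add (acc.filter p) c = acc.filter p := by
            simp [PySem.Set.add, PySem.Set.contains, List.mem_filter, hc, hp]
          simp [List.foldl_cons, hadd, hp, this, ih]
        · simp [List.foldl_cons, hadd, hp, ih]
      · have hadd : PySem.Set.add acc c = acc ++ [c] := by
          simp [PySem.Set.add, PySem.Set.contains, hc]
        by_cases hp : p c = true
        · have hnm : c ∉ acc.filter p := by simp [List.mem_filter, hc]
          have : PySem.Set.add (acc.filter p) c = acc.filter p ++ [c] := by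
            simp [PySem.Set.add, PySem.Set.contains, hnm]
          simp [List.foldl_cons, hadd, hp, this, ih, List.filter_append]
        · simp [List.foldl_cons, hadd, hp, ih, List.filter_append]
  
-- B's append-if fold builds the map of the filter
theorem foldl_append_if_map (p : Char → Bool) (f : Char → String) (l : List Char) (acc : List String) :
    l.foldl (fun out c => if p c then out ++ [f c] else out) acc = acc ++ (l.filter p).map f := by
  induction l generalizing acc with
  | nil => simp
  | cons c l ih =>
      by_cases hp : p c = true
      · simp [List.foldl_cons, hp, ih]
      · simp [List.foldl_cons, hp, ih]

-- ===== VERDICT (by name: the statement is the Claim_ definition above) =====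
theorem more_zeros_spec : Claim_equal_more_zeros := by
  intro s hdom
  unfold Spec_more_zeros more_zeros more_zeros_alt
  have hdom' : ∀ c ∈ s.toList, c.toNat ≤ 126 := by
    intro c hc
    exact dom_code_le c (by
      have := (List.all_eq_true.1 (by simpa [pvDomStr, Dom_more_zeros] using hdom)) c hc
      simpa using this)
  simp only []
  rw [PySem.List.foldl_append_ite_eq_filter, List.filter_map, List.nil_append, List.map_map]
  have hfc : (s.toList.filter
        ((fun x => decide (List.count '0' x > List.count '1' x)) ∘ fun i => PySem.Int.toBinChars (i.toNat : Int)))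
      = s.toList.filter keepB := by
    apply List.filter_congr
    intro c hc
    have h1 := (perCode c.toNat (hdom' c hc)).1
    simpa [Function.comp, keepB] using h1
  have hmc : ∀ c ∈ s.toList.filter keepB,
      ((fun i => String.ofList [Char.ofNat (parseBin i)]) ∘ fun i => PySem.Int.toBinChars (i.toNat : Int)) c = mkStr c := by
    intro c hc
    have h2 := (perCode c.toNat (hdom' c (List.mem_of_mem_filter hc))).2
    simp [Function.comp, h2, mkStr, Char.ofNat_toNat]
  rw [hfc, List.map_congr_left hmc]
  rw [dedup_fold_eq_add]
  have hA : ((s.toList.filter keepB).map mkStr).foldl PySem.Set.add ([] : List String)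
      = ((s.toList.filter keepB).foldl PySem.Set.add ([] : List Char)).map mkStr := by
    simpa using foldl_add_map mkStr mkStr_inj (s.toList.filter keepB) []
  rw [hA]
  rw [foldl_append_if_map keepB (fun c => String.ofList [c]) (PySem.List.dedup s.toList) []]
  have hd : PySem.List.dedup s.toList = s.toList.foldl PySem.Set.add [] := by
    rw [PySem.List.dedup_eq_ofList, PySem.Set.ofList_eq_foldl]
  rw [hd, List.nil_append]
  have := filter_foldl_add keepB s.toList []
  simp only [List.filter_nil] at this
  rw [this]
  rfl
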